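-- pv_equiv track=rewrite | github.com/shinkeonkim/boj-solution-archiving-site | data/source/9398_72519173.py | f
-- ===== SOURCE A (Python) =====
-- def f(s):
--   flag = 0
--
--   for i in s:
--     if 'A' <= i <= 'Z':
--       flag |= 1
--     if 'a' <= i <= 'z':
--       flag |= 2
--     if '0' <= i <= '9':
--       flag |= 4
--   return flag == 7
-- ===== SOURCE B (Python) =====
-- def f(s):
--   return (any('A' <= c <= 'Z' for c in s)
--       and any('a' <= c <= 'z' for c in s)
--       and any('0' <= c <= '9' for c in s))
-- ===== Notes on version B (the rewrite author's own statement) =====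
-- stated objective: simpler
-- what changed: Replaces the single loop maintaining a bitmask flag with three independent short-circuiting existence checks (any per character class) combined with and; each scan stops at the first match.
import Mathlib
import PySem

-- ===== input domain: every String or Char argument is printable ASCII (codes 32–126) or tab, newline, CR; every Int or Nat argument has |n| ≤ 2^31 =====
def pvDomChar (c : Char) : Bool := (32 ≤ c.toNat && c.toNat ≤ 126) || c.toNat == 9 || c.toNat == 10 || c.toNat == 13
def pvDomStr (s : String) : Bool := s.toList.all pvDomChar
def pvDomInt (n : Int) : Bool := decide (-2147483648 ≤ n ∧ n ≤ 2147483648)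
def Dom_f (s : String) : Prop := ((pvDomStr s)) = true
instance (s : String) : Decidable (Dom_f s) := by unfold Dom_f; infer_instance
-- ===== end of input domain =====

-- B replaces A's single bitmask-accumulating loop with three independent short-circuiting existence scans combined with `and`.

-- ===== PORT A =====
-- one loop over the characters, OR-ing bits 1/2/4 into `flag`, then `flag == 7`
def fStep (flag : Nat) (i : Char) : Nat :=
  let flag := if 'A' ≤ i ∧ i ≤ 'Z' then flag ||| 1 else flag
  let flag := if 'a' ≤ i ∧ i ≤ 'z' then flag ||| 2 else flag
  if '0' ≤ i ∧ i ≤ '9' then flag ||| 4 else flag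

def f (s : String) : Bool :=
  (s.toList.foldl fStep 0) == 7

-- ===== PORT B =====
def f_alt (s : String) : Bool :=
  (s.toList.any (fun c => 'A' ≤ c ∧ c ≤ 'Z'))
  && (s.toList.any (fun c => 'a' ≤ c ∧ c ≤ 'z'))
  && (s.toList.any (fun c => '0' ≤ c ∧ c ≤ '9'))

-- ===== PRECONDITION & SPEC =====
def Spec_f (s : String) (out : Bool) : Prop := out = f_alt s
instance (s : String) (out : Bool) : Decidable (Spec_f s out) := by unfold Spec_f; infer_instance

-- ===== CLAIM (what is proved, stated in full; the proofs are below) =====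
def Claim_equal_f : Prop := ∀ (s : String), Dom_f s → Spec_f s (f s)

-- ===== LEMMAS AND PROOFS =====

def bit (b : Bool) (n : Nat) : Nat := if b then n else 0

lemma foldl_fStep (l : List Char) (flag : Nat) :
    l.foldl fStep flag =
      flag ||| bit (l.any (fun c => 'A' ≤ c ∧ c ≤ 'Z')) 1
           ||| bit (l.any (fun c => 'a' ≤ c ∧ c ≤ 'z')) 2
           ||| bit (l.any (fun c => '0' ≤ c ∧ c ≤ '9')) 4 := by
  induction l generalizing flag with
  | nil => simp [bit]
  | cons c l ih =>
    simp only [List.foldl_cons, List.any_cons, ih, fStep, bit]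
    by_cases h1 : 'A' ≤ c ∧ c ≤ 'Z' <;> by_cases h2 : 'a' ≤ c ∧ c ≤ 'z' <;>
      by_cases h3 : '0' ≤ c ∧ c ≤ '9' <;>
      (simp [h1, h2, h3, Nat.or_assoc, Nat.or_comm, Nat.or_left_comm]) <;>
      split_ifs <;> first | rfl | (congr 1; decide)

-- ===== VERDICT (by name: the statement is the Claim_ definition above) =====
theorem f_spec : Claim_equal_f := by
  intro s _
  show f s = f_alt s
  unfold f f_alt
  rw [foldl_fStep]
  cases h1 : s.toList.any (fun c => 'A' ≤ c ∧ c ≤ 'Z') <;>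
    cases h2 : s.toList.any (fun c => 'a' ≤ c ∧ c ≤ 'z') <;>
    cases h3 : s.toList.any (fun c => '0' ≤ c ∧ c ≤ '9') <;>
    simp [bit]
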